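-- pv_equiv track=rewrite | github.com/Bha-Gu/Non-Invertible_Matrix-Based_Hashing | lib.py | interlace8
-- ===== SOURCE A (Python) =====
-- def interlace8(a, b):
--     x = 0
--     y = 0
--     for i in reversed(range(4)):
--         y <<= 1
--         y |= (reverse_bits(a,8) >> i) & 1
--         y <<= 1
--         y |= (b >> i) & 1
--
--     for i in reversed(range(4, 8)):
--         x <<= 1
--         x |= (reverse_bits(a,8) >> i) & 1
--         x <<= 1
--         x |= (b >> i) & 1
--     return x, y
--
-- def reverse_bits(num, num_bits):
--     # Mask to extract the least significant num_bits bits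
--     mask = (1 << num_bits) - 1
--     # Extract the least significant num_bits bits
--     bits = num & mask
--     # Reverse the bits
--     reversed_bits = 0
--     for _ in range(num_bits):
--         reversed_bits <<= 1
--         reversed_bits |= bits & 1
--         bits >>= 1
--     # Combine the reversed bits with the rest of the number
--     result = (num >> num_bits) << num_bits | reversed_bits
--     return result
-- ===== SOURCE B (Python) =====
-- def _spread(v):
--     # scatter the 8 bits of v (0 <= v < 256) into even bit positions 0,2,...,14
--     v = (v | (v << 4)) & 0x0F0F
--     v = (v | (v << 2)) & 0x3333
--     v = (v | (v << 1)) & 0x5555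
--     return v
--
--
-- def interlace8(a, b):
--     # reverse of a's low 8 bits
--     ra = 0
--     t = a & 0xFF
--     for _ in range(8):
--         ra = (ra << 1) | (t & 1)
--         t >>= 1
--     # Morton interleave: a-bits (reversed) on odd positions, b-bits on even ones
--     full = (_spread(ra) << 1) + _spread(b & 0xFF)
--     return divmod(full, 256)
-- ===== Notes on version B (the rewrite author's own statement) =====
-- stated objective: alternative
-- what changed: A interleaves the two bytes bit by bit in two 4-iteration loops (recomputing the 8-bit reversal of a inside every iteration); B reverses a's low byte once, scatters each byte's bits in parallel with the closed-form Morton mask/shift spreading, and splits the combined 16-bit word with divmod.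
import Mathlib
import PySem

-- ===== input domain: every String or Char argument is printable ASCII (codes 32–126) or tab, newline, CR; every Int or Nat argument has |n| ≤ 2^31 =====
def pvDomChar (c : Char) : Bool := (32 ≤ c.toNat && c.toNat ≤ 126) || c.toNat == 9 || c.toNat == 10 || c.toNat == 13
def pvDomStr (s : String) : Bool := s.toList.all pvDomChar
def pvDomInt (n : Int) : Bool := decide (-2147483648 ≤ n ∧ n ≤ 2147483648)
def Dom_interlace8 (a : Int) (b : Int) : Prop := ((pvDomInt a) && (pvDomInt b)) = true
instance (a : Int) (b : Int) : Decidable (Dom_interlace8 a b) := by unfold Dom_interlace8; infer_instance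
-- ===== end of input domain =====

-- B replaces A's two per-bit interleave loops (which recompute the bit reversal on every
-- iteration) by a single Morton mask/shift bit-spreading combination of the reversed low
-- byte of a and the low byte of b (objective: alternative algorithm).

-- ===== PORT A =====
-- reverse_bits(num, num_bits); shift amounts use .toNat (exact: A only calls it with num_bits = 8 ≥ 0)
def reverseBits (num : Int) (numBits : Int) : Int :=
  let mask : Int := ((1:Int) <<< numBits.toNat) - 1
  let bits : Int := PySem.Int.band num mask
  let st := (PySem.List.pyRange 0 numBits 1).foldl
      (fun (st : Int × Int) (_ : Int) =>
        (PySem.Int.bor (st.1 <<< (1:Nat)) (PySem.Int.band st.2 1), st.2 >>> (1:Nat)))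
      ((0 : Int), bits)
  PySem.Int.bor ((num >>> numBits.toNat) <<< numBits.toNat) st.1

-- the loop indices i of `for i in reversed(range(…))` are 0..7, so the shift i.toNat is exact
def interlace8 (a : Int) (b : Int) : Int × Int :=
  let y := ((PySem.List.pyRange 0 4 1).reverse).foldl
      (fun (y : Int) (i : Int) =>
        let y := y <<< (1:Nat)
        let y := PySem.Int.bor y (PySem.Int.band ((reverseBits a 8) >>> i.toNat) 1)
        let y := y <<< (1:Nat)
        PySem.Int.bor y (PySem.Int.band (b >>> i.toNat) 1))
      (0 : Int)
  let x := ((PySem.List.pyRange 4 8 1).reverse).foldl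
      (fun (x : Int) (i : Int) =>
        let x := x <<< (1:Nat)
        let x := PySem.Int.bor x (PySem.Int.band ((reverseBits a 8) >>> i.toNat) 1)
        let x := x <<< (1:Nat)
        PySem.Int.bor x (PySem.Int.band (b >>> i.toNat) 1))
      (0 : Int)
  (x, y)

-- ===== PORT B =====
def spread (v : Int) : Int :=
  let v := PySem.Int.band (PySem.Int.bor v (v <<< (4:Nat))) 0x0F0F
  let v := PySem.Int.band (PySem.Int.bor v (v <<< (2:Nat))) 0x3333
  PySem.Int.band (PySem.Int.bor v (v <<< (1:Nat))) 0x5555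

-- divmod(full, 256) = (full // 256, full % 256)  (exact: the divisor 256 is nonzero)
def interlace8_alt (a : Int) (b : Int) : Int × Int :=
  let st := (PySem.List.pyRange 0 8 1).foldl
      (fun (st : Int × Int) (_ : Int) =>
        (PySem.Int.bor (st.1 <<< (1:Nat)) (PySem.Int.band st.2 1), st.2 >>> (1:Nat)))
      ((0 : Int), PySem.Int.band a 255)
  let full := (spread st.1) <<< (1:Nat) + spread (PySem.Int.band b 255)
  (PySem.Int.floordiv full 256, PySem.Int.mod full 256)

-- ===== PRECONDITION & SPEC =====
def Spec_interlace8 (a : Int) (b : Int) (out : Int × Int) : Prop := out = interlace8_alt a b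
instance (a : Int) (b : Int) (out : Int × Int) : Decidable (Spec_interlace8 a b out) := by unfold Spec_interlace8; infer_instance

-- ===== CLAIM (what is proved, stated in full; the proofs are below) =====
def Claim_equal_interlace8 : Prop := ∀ (a : Int) (b : Int), Dom_interlace8 a b → Spec_interlace8 a b (interlace8 a b)

-- ===== LEMMAS AND PROOFS =====

-- x & 255 is the low byte, also for negative x
theorem band255 (x : Int) : PySem.Int.band x 255 = x % 256 := by
  by_cases h : 0 ≤ x
  · rw [PySem.Int.band_of_nonneg h (by norm_num)]
    have : x.toNat &&& (255:Int).toNat = x.toNat % 256 := by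
      have := Nat.and_two_pow_sub_one_eq_mod x.toNat 8
      norm_num at this ⊢
      exact this
    rw [this]; omega
  · unfold PySem.Int.band
    rw [if_neg h, if_pos (by norm_num : (0:Int) ≤ 255)]
    have : (255:Int).toNat &&& (-x - 1).toNat = (-x - 1).toNat % 256 := by
      rw [Nat.and_comm]
      have := Nat.and_two_pow_sub_one_eq_mod (-x - 1).toNat 8
      norm_num at this ⊢
      exact this
    rw [this]; omega

-- appending one bit c ∈ {0,1} to a nonneg accumulator: (y << 1) | c = 2*y + c
theorem bor_bit (y c : Int) (hy : 0 ≤ y) (hc : 0 ≤ c) (hc2 : c < 2) :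
    PySem.Int.bor (y <<< (1:Nat)) c = 2 * y + c := by
  have hs : y <<< (1:Nat) = 2 * y := by rw [Int.shiftLeft_eq]; ring
  have : c = 0 ∨ c = 1 := by omega
  rcases this with rfl | rfl
  · rw [PySem.Int.bor_zero, hs]; ring
  · rw [PySem.Int.bor_of_nonneg (by omega) (by norm_num)]
    have h1 : (y <<< (1:Nat)).toNat = y.toNat <<< 1 := by
      rw [hs, Nat.shiftLeft_eq]; omega
    have h2 : y.toNat <<< 1 ||| (1:Int).toNat = y.toNat <<< 1 + 1 :=
      (Nat.shiftLeft_add_eq_or_of_lt (by norm_num) y.toNat).symm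
    rw [h1, h2, Nat.shiftLeft_eq]; omega

-- gluing a high part above a byte: (q << 8) | r = q*256 + r  (any sign of q)
theorem bor_high (q r : Int) (h0 : 0 ≤ r) (h1 : r < 256) :
    PySem.Int.bor (q <<< (8:Nat)) r = q * 256 + r := by
  have hs : q <<< (8:Nat) = q * 256 := by rw [Int.shiftLeft_eq]; norm_num
  by_cases hq : 0 ≤ q
  · rw [PySem.Int.bor_of_nonneg (by omega) h0]
    have h2 : (q <<< (8:Nat)).toNat = q.toNat <<< 8 := by rw [hs, Nat.shiftLeft_eq]; omega
    have h3 : q.toNat <<< 8 ||| r.toNat = q.toNat <<< 8 + r.toNat :=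
      (Nat.shiftLeft_add_eq_or_of_lt (by omega : r.toNat < 2 ^ 8) q.toNat).symm
    rw [h2, h3, Nat.shiftLeft_eq]; omega
  · rw [hs]
    unfold PySem.Int.bor
    rw [if_neg (by omega), if_pos h0]
    have key : (-(q * 256) - 1).toNat &&& r.toNat = r.toNat := by
      apply Nat.eq_of_testBit_eq
      intro i
      rw [Nat.testBit_and]
      by_cases hi : i < 8
      · have ht : (-(q * 256) - 1).toNat.testBit i = true := by
          rw [Nat.testBit_eq_decide_div_mod_eq]
          have : (-(q * 256) - 1).toNat = (-q - 1).toNat * 256 + 255 := by omega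
          rw [this]
          interval_cases i <;> simp <;> omega
        rw [ht, Bool.true_and]
      · have hrf : r.toNat.testBit i = false := by
          apply Nat.testBit_lt_two_pow
          calc r.toNat < 2 ^ 8 := by omega
            _ ≤ 2 ^ i := Nat.pow_le_pow_right (by norm_num) (by omega)
        rw [hrf, Bool.and_false]
    rw [key]; omega

-- value of the bit-reversal loop: rv n t = reversal of the n low bits of t
def rv : Nat → Int → Int
  | 0, _ => 0
  | n+1, t => (t % 2) * 2 ^ n + rv n (t / 2)

theorem rv_bound (n : Nat) (t : Int) : 0 ≤ rv n t ∧ rv n t < 2 ^ n := by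
  induction n generalizing t with
  | zero => simp [rv]
  | succ n ih =>
    have h := ih (t / 2)
    have h2 : 0 ≤ t % 2 ∧ t % 2 < 2 := by omega
    have hp : (0:Int) < 2 ^ n := by positivity
    have hb : t % 2 * 2 ^ n ≤ 2 ^ n := by nlinarith
    have hb0 : 0 ≤ t % 2 * 2 ^ n := by nlinarith
    simp only [rv, pow_succ]
    constructor
    · nlinarith [h.1]
    · nlinarith [h.2]

theorem revfold (l : List Int) (y t : Int) (hy : 0 ≤ y) :
    (l.foldl
      (fun (st : Int × Int) (_ : Int) =>
        (PySem.Int.bor (st.1 <<< (1:Nat)) (PySem.Int.band st.2 1), st.2 >>> (1:Nat)))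
      (y, t))
      = (y * 2 ^ l.length + rv l.length t, t / 2 ^ l.length) := by
  induction l generalizing y t with
  | nil => simp [rv]
  | cons x xs ih =>
    rw [List.foldl_cons]
    have hb : PySem.Int.band t 1 = t % 2 := by
      rw [PySem.Int.band_one]
      simp [pysem, (by norm_num : (0:Int) < 2)]
    have hshift : t >>> (1:Nat) = t / 2 := by
      simpa using Int.shiftRight_eq_div_pow t 1
    have hstep : PySem.Int.bor (y <<< (1:Nat)) (PySem.Int.band t 1) = 2 * y + t % 2 := by
      rw [hb]
      exact bor_bit y (t % 2) hy (by omega) (by omega)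
    simp only [hstep, hshift]
    rw [ih (2 * y + t % 2) (t / 2) (by omega)]
    have hd : t / 2 / 2 ^ xs.length = t / 2 ^ (xs.length + 1) := by
      rw [Int.ediv_ediv_of_nonneg (by norm_num)]
      norm_num [pow_succ, mul_comm]
    rw [hd]
    simp only [List.length_cons]
    refine Prod.ext ?_ rfl
    show (2 * y + t % 2) * 2 ^ xs.length + rv xs.length (t / 2)
        = y * 2 ^ (xs.length + 1) + rv (xs.length + 1) t
    simp only [rv, pow_succ]
    ring

theorem RBval (a : Int) : reverseBits a 8 = (a / 256) * 256 + rv 8 (a % 256) := by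
  unfold reverseBits
  have hmask : ((1:Int) <<< ((8:Int)).toNat) - 1 = 255 := by decide
  have hrange : PySem.List.pyRange 0 8 1 = [0,1,2,3,4,5,6,7] := by decide
  simp only [hmask, hrange, band255]
  rw [revfold [0,1,2,3,4,5,6,7] 0 (a % 256) le_rfl]
  have h8 : a >>> ((8:Int)).toNat = a / 256 := by
    simpa using Int.shiftRight_eq_div_pow a 8
  simp only [List.length_cons, List.length_nil, h8]
  have hb := rv_bound 8 (a % 256)
  rw [show ((8:Int)).toNat = (8:Nat) from rfl]
  rw [bor_high (a / 256) _ (by simpa using hb.1) (by simpa using hb.2)]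
  norm_num

-- Morton spread of a byte, as arithmetic on its bits
def msInt (v : Int) : Int :=
  v % 2 + (v / 2 % 2) * 4 + (v / 4 % 2) * 16 + (v / 8 % 2) * 64 +
    (v / 16 % 2) * 256 + (v / 32 % 2) * 1024 + (v / 64 % 2) * 4096 + (v / 128 % 2) * 16384

set_option maxRecDepth 40000 in
theorem spread_val (v : Int) (h0 : 0 ≤ v) (h1 : v < 256) : spread v = msInt v := by
  have key : ∀ u : Fin 256, spread ((u : Nat) : Int) = msInt ((u : Nat) : Int) := by decide
  have hv : v = ((v.toNat : Nat) : Int) := by omega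
  rw [hv]
  exact key ⟨v.toNat, by omega⟩

-- one double step of A's interleave loops
theorem step2 (y X B : Int) (k : Nat) (hy : 0 ≤ y) :
    PySem.Int.bor
      ((PySem.Int.bor (y <<< (1:Nat)) (PySem.Int.band (X >>> k) 1)) <<< (1:Nat))
      (PySem.Int.band (B >>> k) 1)
      = 4 * y + 2 * (X / 2 ^ k % 2) + B / 2 ^ k % 2 := by
  have hsH : ∀ Z : Int, Z >>> k = Z / 2 ^ k := fun Z => by
    simpa using Int.shiftRight_eq_div_pow Z k
  have hband : ∀ Z : Int, PySem.Int.band (Z >>> k) 1 = Z / 2 ^ k % 2 := fun Z => by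
    rw [PySem.Int.band_one, hsH]
    simp [pysem, (by norm_num : (0:Int) < 2)]
  have hp : (0:Int) < 2 ^ k := by positivity
  rw [hband, hband]
  rw [bor_bit y (X / 2 ^ k % 2) hy (by omega) (by omega)]
  rw [bor_bit _ (B / 2 ^ k % 2) (by omega) (by omega) (by omega)]
  ring

theorem interlace8_eq_alt (a b : Int) : interlace8 a b = interlace8_alt a b := by
  unfold interlace8 interlace8_alt
  rw [show PySem.List.pyRange 0 8 1 = [0,1,2,3,4,5,6,7] from by decide]
  rw [revfold _ 0 (PySem.Int.band a 255) le_rfl]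
  rw [show (PySem.List.pyRange 0 4 1).reverse = [3,2,1,0] from by decide]
  rw [show (PySem.List.pyRange 4 8 1).reverse = [7,6,5,4] from by decide]
  simp only [List.foldl_cons, List.foldl_nil, List.length_cons, List.length_nil, band255]
  simp only [show Int.toNat 0 = 0 from rfl, show Int.toNat 1 = 1 from rfl,
    show Int.toNat 2 = 2 from rfl, show Int.toNat 3 = 3 from rfl,
    show Int.toNat 4 = 4 from rfl, show Int.toNat 5 = 5 from rfl,
    show Int.toNat 6 = 6 from rfl, show Int.toNat 7 = 7 from rfl]
  rw [show (0:Int) * 2 ^ (0+1+1+1+1+1+1+1+1) + rv (0+1+1+1+1+1+1+1+1) (a % 256) = rv 8 (a % 256) from by norm_num]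
  rw [step2 0 _ _ 3 le_rfl]
  rw [step2 _ _ _ 2 (by omega)]
  rw [step2 _ _ _ 1 (by omega)]
  rw [step2 _ _ _ 0 (by omega)]
  rw [step2 0 _ _ 7 le_rfl]
  rw [step2 _ _ _ 6 (by omega)]
  rw [step2 _ _ _ 5 (by omega)]
  rw [step2 _ _ _ 4 (by omega)]
  rw [RBval a]
  have hb := rv_bound 8 (a % 256)
  norm_num at hb
  rw [spread_val _ (by omega) (by omega)]
  rw [spread_val (b % 256) (by omega) (by omega)]
  generalize hrv : rv 8 (a % 256) = r at *
  rw [Int.shiftLeft_eq]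
  unfold msInt
  norm_num
  obtain ⟨hb0, hb1⟩ := hb
  have c1 : (a/256*256+r) % 2 = r % 2 := by omega
  have c2 : (a/256*256+r)/2%2 = r/2%2 := by omega
  have c4 : (a/256*256+r)/4%2 = r/4%2 := by omega
  have c8 : (a/256*256+r)/8%2 = r/8%2 := by omega
  have c16 : (a/256*256+r)/16%2 = r/16%2 := by omega
  have c32 : (a/256*256+r)/32%2 = r/32%2 := by omega
  have c64 : (a/256*256+r)/64%2 = r/64%2 := by omega
  have c128 : (a/256*256+r)/128%2 = r/128%2 := by omega
  have d2 : b/2%2 = b%256/2%2 := by omega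
  have d4 : b/4%2 = b%256/4%2 := by omega
  have d8 : b/8%2 = b%256/8%2 := by omega
  have d16 : b/16%2 = b%256/16%2 := by omega
  have d32 : b/32%2 = b%256/32%2 := by omega
  have d64 : b/64%2 = b%256/64%2 := by omega
  have d128 : b/128%2 = b%256/128%2 := by omega
  rw [c1, c2, c4, c8, c16, c32, c64, c128, d2, d4, d8, d16, d32, d64, d128]
  generalize h0 : r % 2 = u0
  generalize h1 : r/2%2 = u1
  generalize h2 : r/4%2 = u2
  generalize h3 : r/8%2 = u3
  generalize h4 : r/16%2 = u4
  generalize h5 : r/32%2 = u5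
  generalize h6 : r/64%2 = u6
  generalize h7 : r/128%2 = u7
  generalize g0 : b % 2 = v0
  generalize g1 : b%256/2%2 = v1
  generalize g2 : b%256/4%2 = v2
  generalize g3 : b%256/8%2 = v3
  generalize g4 : b%256/16%2 = v4
  generalize g5 : b%256/32%2 = v5
  generalize g6 : b%256/64%2 = v6
  generalize g7 : b%256/128%2 = v7
  have B0 : 0 ≤ u0 ∧ u0 ≤ 1 := by omega
  have B1 : 0 ≤ u1 ∧ u1 ≤ 1 := by omega
  have B2 : 0 ≤ u2 ∧ u2 ≤ 1 := by omega
  have B3 : 0 ≤ u3 ∧ u3 ≤ 1 := by omega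
  have B4 : 0 ≤ u4 ∧ u4 ≤ 1 := by omega
  have B5 : 0 ≤ u5 ∧ u5 ≤ 1 := by omega
  have B6 : 0 ≤ u6 ∧ u6 ≤ 1 := by omega
  have B7 : 0 ≤ u7 ∧ u7 ≤ 1 := by omega
  have C0 : 0 ≤ v0 ∧ v0 ≤ 1 := by omega
  have C1 : 0 ≤ v1 ∧ v1 ≤ 1 := by omega
  have C2 : 0 ≤ v2 ∧ v2 ≤ 1 := by omega
  have C3 : 0 ≤ v3 ∧ v3 ≤ 1 := by omega
  have C4 : 0 ≤ v4 ∧ v4 ≤ 1 := by omega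
  have C5 : 0 ≤ v5 ∧ v5 ≤ 1 := by omega
  have C6 : 0 ≤ v6 ∧ v6 ≤ 1 := by omega
  have C7 : 0 ≤ v7 ∧ v7 ≤ 1 := by omega
  clear h0 h1 h2 h3 h4 h5 h6 h7 g0 g1 g2 g3 g4 g5 g6 g7 hrv hb0 hb1 c1 c2 c4 c8 c16 c32 c64 c128 d2 d4 d8 d16 d32 d64 d128
  clear r a b
  omega

-- ===== VERDICT (by name: the statement is the Claim_ definition above) =====
theorem interlace8_spec : Claim_equal_interlace8 := by
  intro a b _
  exact interlace8_eq_alt a b
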